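-- pv_equiv track=rewrite | github.com/junxng/churn-mlops-project | src/Sentiment_Analysis/components/data_ingestion.py | _expand_contractions
-- ===== SOURCE A (Python) =====
-- def _expand_contractions(text: str) -> str:
--     """Expand contractions in text."""
--     contractions = {
--         "don't": 'do not', "can't": 'cannot', "won't": 'will not', "isn't": 'is not',
--         "aren't": 'are not', "wasn't": 'was not', "weren't": 'were not', "hasn't": 'has not',
--         "haven't": 'have not', "hadn't": 'had not', "doesn't": 'does not', "didn't": 'did not',
--         "shouldn't": 'should not', "couldn't": 'could not', "wouldn't": 'would not', "mightn't": 'might not',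
--         "mustn't": 'must not', "needn't": 'need not'
--     }
--
--     for contraction, expanded in contractions.items():
--         text = text.replace(contraction, expanded)
--     return text
-- ===== SOURCE B (Python) =====
-- def _expand_contractions(text: str) -> str:
--     """Expand contractions in text.
--
--     Same lookup table as the original (it is the task's data), but a different
--     algorithm: one left-to-right scan emitting the expansion of the first key
--     matching at the current position, instead of 18 sequential full-text
--     replace passes.
--     """
--     contractions = {
--         "don't": 'do not', "can't": 'cannot', "won't": 'will not', "isn't": 'is not',
--         "aren't": 'are not', "wasn't": 'was not', "weren't": 'were not', "hasn't": 'has not',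
--         "haven't": 'have not', "hadn't": 'had not', "doesn't": 'does not', "didn't": 'did not',
--         "shouldn't": 'should not', "couldn't": 'could not', "wouldn't": 'would not', "mightn't": 'might not',
--         "mustn't": 'must not', "needn't": 'need not'
--     }
--     out = []
--     i = 0
--     n = len(text)
--     while i < n:
--         for contraction, expanded in contractions.items():
--             if text.startswith(contraction, i):
--                 out.append(expanded)
--                 i += len(contraction)
--                 break
--         else:
--             out.append(text[i])
--             i += 1
--     return ''.join(out)
-- ===== Notes on version B (the rewrite author's own statement) =====
-- stated objective: alternative
-- what changed: Replaces A's 18 sequential full-text replace passes (each building an intermediate string) by a single left-to-right scan that at each position tries the contraction keys in dict order, emits the expansion of the first match (or the current character) and builds the output once; correct because no key overlaps, is a prefix/substring of another, or can be (re)created by an expansion.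
import Mathlib
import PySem

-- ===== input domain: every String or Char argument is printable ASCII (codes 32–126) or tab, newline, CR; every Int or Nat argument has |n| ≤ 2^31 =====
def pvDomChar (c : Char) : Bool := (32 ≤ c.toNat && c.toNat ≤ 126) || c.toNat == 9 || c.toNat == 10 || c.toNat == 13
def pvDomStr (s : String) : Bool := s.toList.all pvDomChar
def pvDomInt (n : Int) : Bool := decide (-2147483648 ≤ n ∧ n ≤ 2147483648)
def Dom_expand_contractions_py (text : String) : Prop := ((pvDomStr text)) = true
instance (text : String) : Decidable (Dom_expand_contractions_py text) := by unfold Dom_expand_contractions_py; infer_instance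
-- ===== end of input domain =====

-- B replaces A's 18 sequential full-text replace passes by ONE left-to-right scan that at each
-- position emits the expansion of the first matching key (or the character); same return value,
-- a different (single-pass) algorithm, not claimed faster.

-- ===== PORT A =====
def expand_contractions_py (text : String) : String :=
  let t := PySem.Str.replace text "don't" "do not"
  let t := PySem.Str.replace t "can't" "cannot"
  let t := PySem.Str.replace t "won't" "will not"
  let t := PySem.Str.replace t "isn't" "is not"
  let t := PySem.Str.replace t "aren't" "are not"
  let t := PySem.Str.replace t "wasn't" "was not"
  let t := PySem.Str.replace t "weren't" "were not"
  let t := PySem.Str.replace t "hasn't" "has not"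
  let t := PySem.Str.replace t "haven't" "have not"
  let t := PySem.Str.replace t "hadn't" "had not"
  let t := PySem.Str.replace t "doesn't" "does not"
  let t := PySem.Str.replace t "didn't" "did not"
  let t := PySem.Str.replace t "shouldn't" "should not"
  let t := PySem.Str.replace t "couldn't" "could not"
  let t := PySem.Str.replace t "wouldn't" "would not"
  let t := PySem.Str.replace t "mightn't" "might not"
  let t := PySem.Str.replace t "mustn't" "must not"
  let t := PySem.Str.replace t "needn't" "need not"
  t

-- ===== PORT B =====
-- The contractions table, in dict (insertion) order, as (key, expansion) char lists.
def pvTable : List (List Char × List Char) :=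
  [("don't".toList, "do not".toList),
   ("can't".toList, "cannot".toList),
   ("won't".toList, "will not".toList),
   ("isn't".toList, "is not".toList),
   ("aren't".toList, "are not".toList),
   ("wasn't".toList, "was not".toList),
   ("weren't".toList, "were not".toList),
   ("hasn't".toList, "has not".toList),
   ("haven't".toList, "have not".toList),
   ("hadn't".toList, "had not".toList),
   ("doesn't".toList, "does not".toList),
   ("didn't".toList, "did not".toList),
   ("shouldn't".toList, "should not".toList),
   ("couldn't".toList, "could not".toList),
   ("wouldn't".toList, "would not".toList),
   ("mightn't".toList, "might not".toList),
   ("mustn't".toList, "must not".toList),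
   ("needn't".toList, "need not".toList)]

-- for-loop over contractions.items() with break: first key that matches at the current position
def pvTryKey : List (List Char × List Char) → List Char → Option (List Char × Nat)
  | [], _ => none
  | (k, e) :: rest, l => if k.isPrefixOf l then some (e, k.length) else pvTryKey rest l

-- the while-loop: advance by the matched key's length (i += len(key); drop (n-1) t = drop n (c::t)
-- since every table key is nonempty) or by one character
def pvScan (T : List (List Char × List Char)) : List Char → List Char
  | [] => []
  | c :: t =>
    match pvTryKey T (c :: t) with
    | some (e, n) => e ++ pvScan T (t.drop (n - 1))
    | none => c :: pvScan T t
termination_by l => l.length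
decreasing_by all_goals (simp; try omega)

def expand_contractions_py_alt (text : String) : String :=
  String.ofList (pvScan pvTable text.toList)

-- ===== PRECONDITION & SPEC =====
def Spec_expand_contractions_py (text : String) (out : String) : Prop := out = expand_contractions_py_alt text
instance (text : String) (out : String) : Decidable (Spec_expand_contractions_py text out) := by unfold Spec_expand_contractions_py; infer_instance

-- ===== CLAIM (what is proved, stated in full; the proofs are below) =====
def Claim_equal_expand_contractions_py : Prop := ∀ (text : String), Dom_expand_contractions_py text → Spec_expand_contractions_py text (expand_contractions_py text)

-- ===== LEMMAS AND PROOFS =====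

-- A single replace pass, as structural recursion (proof-side mirror of PySem.Chars.replace.go)
def replOne (k e : List Char) : List Char → List Char
  | [] => []
  | c :: t => if k.isPrefixOf (c :: t) then e ++ replOne k e (t.drop (k.length - 1)) else c :: replOne k e t
termination_by l => l.length
decreasing_by all_goals (simp; try omega)

lemma pvGo_eq (k e : List Char) (hk : k ≠ []) :
    ∀ (fuel : Nat) (l acc : List Char), l.length ≤ fuel →
      PySem.Chars.replace.go k e fuel l acc = acc.reverse ++ replOne k e l := by
  intro fuel
  induction fuel with
  | zero =>
    intro l acc hl
    have : l = [] := by cases l <;> simp_all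
    subst this
    simp [PySem.Chars.replace.go, replOne]
  | succ n ih =>
    intro l acc hl
    cases l with
    | nil => simp [PySem.Chars.replace.go, replOne]
    | cons c t =>
      rw [PySem.Chars.replace.go]
      have hlt : t.length ≤ n := by have := hl; simp at this; omega
      by_cases hp : k.isPrefixOf (c :: t)
      · rw [if_pos hp]
        have hk1 : 1 ≤ k.length := by cases k <;> simp_all
        have hdrop : List.drop k.length (c :: t) = t.drop (k.length - 1) := by
          cases k with
          | nil => simp_all
          | cons a b => simp
        have hlen : (t.drop (k.length - 1)).length ≤ n := by
          simp [List.length_drop]; omega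
        rw [hdrop, ih _ _ hlen, replOne, if_pos hp]
        simp
      · rw [if_neg hp]
        rw [ih _ _ hlt, replOne, if_neg hp]
        simp

lemma pvReplace_eq (l k e : List Char) (hk : k ≠ []) :
    PySem.Chars.replace l k e = replOne k e l := by
  have hke : k.isEmpty = false := by cases k <;> simp_all
  rw [PySem.Chars.replace, hke]
  simpa using pvGo_eq k e hk l.length l [] le_rfl

lemma pvTryKey_none_iff (T : List (List Char × List Char)) (l : List Char) :
    pvTryKey T l = none ↔ ∀ p ∈ T, ¬ p.1 <+: l := by
  induction T with
  | nil => simp [pvTryKey]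
  | cons p T ih =>
    obtain ⟨k₀, e₀⟩ := p
    by_cases hp : k₀.isPrefixOf l
    · simp only [pvTryKey, if_pos hp]
      constructor
      · intro h; exact absurd h (by simp)
      · intro h
        exact absurd (List.isPrefixOf_iff_prefix.mp hp) (h (k₀, e₀) (by simp))
    · simp only [pvTryKey, if_neg hp, ih, List.mem_cons]
      constructor
      · rintro h p (rfl | hp')
        · exact fun hc => hp (List.isPrefixOf_iff_prefix.mpr hc)
        · exact h p hp'
      · intro h p hp'
        exact h p (Or.inr hp')

lemma pvTryKey_first (T₁ T₂ : List (List Char × List Char)) (k' e' m : List Char)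
    (h1 : ∀ p ∈ T₁, ¬ p.1 <+: m) (h2 : k' <+: m) :
    pvTryKey (T₁ ++ (k', e') :: T₂) m = some (e', k'.length) := by
  induction T₁ with
  | nil => simp [pvTryKey, List.isPrefixOf_iff_prefix.mpr h2]
  | cons p T₁ ih =>
    have hnp : ¬ p.1.isPrefixOf m := by
      intro hc
      exact h1 p (by simp) (List.isPrefixOf_iff_prefix.mp hc)
    obtain ⟨k₀, e₀⟩ := p
    simp only [List.cons_append, pvTryKey]
    rw [if_neg hnp]
    exact ih (fun p hp => h1 p (by simp [hp]))

lemma pvTryKey_some_spec (T : List (List Char × List Char)) (l e' : List Char) (n' : Nat)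
    (h : pvTryKey T l = some (e', n')) :
    ∃ T₁ k' T₂, T = T₁ ++ (k', e') :: T₂ ∧ k' <+: l ∧ n' = k'.length ∧ ∀ p ∈ T₁, ¬ p.1 <+: l := by
  induction T with
  | nil => simp [pvTryKey] at h
  | cons p T ih =>
    obtain ⟨k₀, e₀⟩ := p
    by_cases hp : k₀.isPrefixOf l
    · simp only [pvTryKey, if_pos hp, Option.some.injEq, Prod.mk.injEq] at h
      exact ⟨[], k₀, T, by simp [h.1], List.isPrefixOf_iff_prefix.mp hp, h.2.symm, by simp⟩
    · simp only [pvTryKey, if_neg hp] at h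
      obtain ⟨T₁, k', T₂, rfl, hpre, hn, hnone⟩ := ih h
      refine ⟨(k₀, e₀) :: T₁, k', T₂, by simp, hpre, hn, ?_⟩
      rintro p hp'
      rcases List.mem_cons.mp hp' with rfl | hp'
      · simpa [List.isPrefixOf_iff_prefix] using hp
      · exact hnone p hp'

lemma pvScan_cons (T : List (List Char × List Char)) (c : Char) (t : List Char) :
    pvScan T (c :: t) = match pvTryKey T (c :: t) with
      | some (e, n) => e ++ pvScan T (t.drop (n - 1))
      | none => c :: pvScan T t := by
  rw [pvScan]

lemma pvScan_cons_some (T : List (List Char × List Char)) (c : Char) (t e' : List Char) (n' : Nat)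
    (h : pvTryKey T (c :: t) = some (e', n')) (hn : 1 ≤ n') :
    pvScan T (c :: t) = e' ++ pvScan T ((c :: t).drop n') := by
  rw [pvScan_cons, h]
  obtain ⟨n, rfl⟩ := Nat.exists_eq_add_of_le hn
  simp [Nat.add_comm 1 n]

lemma pvScan_cons_none (T : List (List Char × List Char)) (c : Char) (t : List Char)
    (h : pvTryKey T (c :: t) = none) :
    pvScan T (c :: t) = c :: pvScan T t := by
  rw [pvScan_cons, h]

lemma pvScan_nil_table : ∀ m, pvScan [] m = m := by
  intro m
  induction m with
  | nil => rw [pvScan]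
  | cons c t ih => rw [pvScan_cons_none _ _ _ (by simp [pvTryKey]), ih]

lemma replOne_clean (k e : List Char) :
    ∀ (u m : List Char), (∀ q < u.length, ¬ k <+: u.drop q ∧ ¬ u.drop q <+: k) →
      replOne k e (u ++ m) = u ++ replOne k e m := by
  intro u
  induction u with
  | nil => intro m h; simp
  | cons c u' ih =>
    intro m h
    have h0 := h 0 (by simp)
    simp only [List.drop_zero] at h0
    have hnp : ¬ k.isPrefixOf (c :: (u' ++ m)) := by
      intro hc
      rcases List.prefix_or_prefix_of_prefix (List.isPrefixOf_iff_prefix.mp hc)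
          (List.prefix_append (c :: u') m) with h1 | h1
      · exact h0.1 h1
      · exact h0.2 h1
    rw [List.cons_append, replOne, if_neg hnp]
    rw [ih m (fun q hq => by simpa using h (q + 1) (by simpa using hq))]
    simp

lemma pvScan_clean (T : List (List Char × List Char)) :
    ∀ (u m : List Char), (∀ p ∈ T, ∀ q < u.length, ¬ p.1 <+: u.drop q ∧ ¬ u.drop q <+: p.1) →
      pvScan T (u ++ m) = u ++ pvScan T m := by
  intro u
  induction u with
  | nil => intro m h; simp
  | cons c u' ih =>
    intro m h
    have hnone : pvTryKey T (c :: (u' ++ m)) = none := by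
      rw [pvTryKey_none_iff]
      intro p hpT hpre
      have h0 := h p hpT 0 (by simp)
      simp only [List.drop_zero] at h0
      rcases List.prefix_or_prefix_of_prefix hpre (List.prefix_append (c :: u') m) with h1 | h1
      · exact h0.1 h1
      · exact h0.2 h1
    rw [List.cons_append, pvScan_cons_none _ _ _ hnone]
    rw [ih m (fun p hpT q hq => by simpa using h p hpT (q + 1) (by simpa using hq))]
    simp

lemma replOne_prefix (k e k' : List Char)
    (h4 : ∀ q, 1 ≤ q → q < k'.length → ¬ k'.drop q <+: e ∧ ¬ e <+: k'.drop q) :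
    ∀ (t : List Char) (q : Nat), 1 ≤ q → k'.drop q <+: replOne k e t → k'.drop q <+: t := by
  intro t
  induction t with
  | nil =>
    intro q hq hpre
    simp only [replOne] at hpre
    simp [List.prefix_nil.mp hpre]
  | cons c₀ t₀ ih =>
    intro q hq hpre
    by_cases hs : k'.drop q = []
    · simp [hs]
    have hql : q < k'.length :=
      lt_of_not_ge (fun hh => hs (List.drop_eq_nil_of_le hh))
    by_cases hp : k.isPrefixOf (c₀ :: t₀)
    · rw [replOne, if_pos hp] at hpre
      rcases List.prefix_or_prefix_of_prefix hpre (List.prefix_append e _) with h1 | h1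
      · exact absurd h1 ((h4 q hq hql).1)
      · exact absurd h1 ((h4 q hq hql).2)
    · rw [replOne, if_neg hp] at hpre
      have hdq : k'.drop q = k'[q] :: k'.drop (q + 1) := List.drop_eq_getElem_cons hql
      rw [hdq] at hpre
      obtain ⟨hhead, htail⟩ := List.cons_prefix_cons.mp hpre
      have hrec := ih (q + 1) (by omega) htail
      rw [hdq, hhead]
      exact List.cons_prefix_cons.mpr ⟨rfl, hrec⟩

lemma pvMain (k e : List Char) (T' : List (List Char × List Char))
    (hk : k ≠ [])
    (hkeys : ∀ p ∈ T', p.1 ≠ [])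
    (hpair : ∀ p ∈ T', ∀ q ∈ T', p.1 <+: q.1 → p.1 = q.1)
    (hH2 : ∀ p ∈ T', ∀ q < p.1.length, ¬ k <+: p.1.drop q ∧ ¬ p.1.drop q <+: k)
    (hH3 : ∀ p ∈ T', ∀ q < e.length, ¬ p.1 <+: e.drop q ∧ ¬ e.drop q <+: p.1)
    (hH4 : ∀ p ∈ T', ∀ q, 1 ≤ q → q < p.1.length → ¬ p.1.drop q <+: e ∧ ¬ e <+: p.1.drop q) :
    ∀ l, pvScan T' (replOne k e l) = pvScan ((k, e) :: T') l := by
  suffices H : ∀ n l, l.length ≤ n → pvScan T' (replOne k e l) = pvScan ((k, e) :: T') l by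
    intro l; exact H l.length l le_rfl
  intro n
  induction n with
  | zero =>
    intro l hl
    have : l = [] := by cases l <;> simp_all
    subst this
    simp [replOne, pvScan]
  | succ n ih =>
    intro l hl
    cases l with
    | nil => simp [replOne, pvScan]
    | cons c t =>
      have hk1 : 1 ≤ k.length := by
        cases k
        · exact absurd rfl hk
        · simp
      have hlt : t.length ≤ n := by have := hl; simp at this; omega
      by_cases hp : k.isPrefixOf (c :: t)
      · -- the head key matches: both sides emit e and continue after the match
        have htk : pvTryKey ((k, e) :: T') (c :: t) = some (e, k.length) := by
          simp only [pvTryKey, if_pos hp]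
        rw [pvScan_cons_some _ _ _ _ _ htk hk1]
        rw [replOne, if_pos hp]
        have hdrop : t.drop (k.length - 1) = (c :: t).drop k.length := by
          obtain ⟨a, k'', rfl⟩ : ∃ a k'', k = a :: k'' := by
            cases k
            · exact absurd rfl hk
            · exact ⟨_, _, rfl⟩
          simp
        rw [hdrop]
        rw [pvScan_clean T' e _ (fun p hp' q hq => hH3 p hp' q hq)]
        congr 1
        exact ih _ (by simp; omega)
      · cases htk : pvTryKey T' (c :: t) with
        | none =>
          -- no key matches here: both sides copy c
          have htk2 : pvTryKey ((k, e) :: T') (c :: t) = none := by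
            simp only [pvTryKey, if_neg hp]; exact htk
          rw [pvScan_cons_none _ _ _ htk2]
          rw [replOne, if_neg hp]
          have hnone2 : pvTryKey T' (c :: replOne k e t) = none := by
            rw [pvTryKey_none_iff]
            rintro ⟨k', e'⟩ hp' hpre
            have hk'ne : k' ≠ [] := hkeys (k', e') hp'
            obtain ⟨a, k'', rfl⟩ : ∃ a k'', k' = a :: k'' := by
              cases k'
              · exact absurd rfl hk'ne
              · exact ⟨_, _, rfl⟩
            obtain ⟨rfl, htail⟩ := List.cons_prefix_cons.mp hpre
            have hrec := replOne_prefix k e (a :: k'')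
              (fun q h1 h2 => hH4 (a :: k'', e') hp' q h1 h2) t 1 le_rfl (by simpa using htail)
            have hfull : (a :: k'') <+: (a :: t) := List.cons_prefix_cons.mpr ⟨rfl, by simpa using hrec⟩
            exact (pvTryKey_none_iff T' (a :: t)).mp htk (a :: k'', e') hp' hfull
          rw [pvScan_cons_none _ _ _ hnone2]
          congr 1
          exact ih t hlt
        | some pr =>
          -- a later key matches first: the pass cannot touch that occurrence
          obtain ⟨e_j, n_j⟩ := pr
          obtain ⟨T₁, k_j, T₂, hTeq, hpre_j, hnj, hT₁⟩ := pvTryKey_some_spec T' _ _ _ htk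
          have hkj_mem : (k_j, e_j) ∈ T' := by rw [hTeq]; simp
          have hkjne : k_j ≠ [] := hkeys _ hkj_mem
          have hkj1 : 1 ≤ k_j.length := by
            cases k_j
            · exact absurd rfl hkjne
            · simp
          obtain ⟨r, hr⟩ := hpre_j
          have hrepl : replOne k e (c :: t) = k_j ++ replOne k e r := by
            rw [← hr]
            exact replOne_clean k e k_j r (fun q hq => hH2 _ hkj_mem q hq)
          rw [hrepl]
          have hfirst : pvTryKey T' (k_j ++ replOne k e r) = some (e_j, k_j.length) := by
            rw [hTeq]
            apply pvTryKey_first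
            · intro p hp1 hpc
              have hpT' : p ∈ T' := by rw [hTeq]; exact List.mem_append_left _ hp1
              rcases List.prefix_or_prefix_of_prefix hpc (List.prefix_append k_j _) with h1 | h1
              · have heq := hpair p hpT' (k_j, e_j) hkj_mem h1
                exact hT₁ p hp1 (heq ▸ ⟨r, hr⟩)
              · have heq := hpair (k_j, e_j) hkj_mem p hpT' h1
                exact hT₁ p hp1 (by rw [← heq]; exact ⟨r, hr⟩)
            · exact List.prefix_append k_j _
          obtain ⟨a, kj', rfl⟩ : ∃ a kj'', k_j = a :: kj'' := by
            cases k_j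
            · exact absurd rfl hkjne
            · exact ⟨_, _, rfl⟩
          rw [List.cons_append]
          rw [pvScan_cons_some T' a _ _ _ (by rw [← List.cons_append]; exact hfirst) (by simp)]
          rw [show ((a :: (kj' ++ replOne k e r)).drop (a :: kj').length) = replOne k e r from by
            rw [← List.cons_append]; exact List.drop_left]
          have hrlen : r.length ≤ n := by
            have hlen : (a :: kj').length + r.length = (c :: t).length := by
              rw [← hr]; simp; omega
            simp at hlen
            omega
          rw [ih r hrlen]
          have htk2 : pvTryKey ((k, e) :: T') (c :: t) = some (e_j, n_j) := by
            simp only [pvTryKey, if_neg hp]; exact htk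
          rw [pvScan_cons_some _ _ _ _ _ htk2 (by simp [hnj])]
          rw [show (c :: t).drop n_j = r from by rw [← hr, hnj]; exact List.drop_left]

-- the 18 table tails
def pvT0 : List (List Char × List Char) :=
  [("don't".toList, "do not".toList), ("can't".toList, "cannot".toList), ("won't".toList, "will not".toList), ("isn't".toList, "is not".toList), ("aren't".toList, "are not".toList), ("wasn't".toList, "was not".toList), ("weren't".toList, "were not".toList), ("hasn't".toList, "has not".toList), ("haven't".toList, "have not".toList), ("hadn't".toList, "had not".toList), ("doesn't".toList, "does not".toList), ("didn't".toList, "did not".toList), ("shouldn't".toList, "should not".toList), ("couldn't".toList, "could not".toList), ("wouldn't".toList, "would not".toList), ("mightn't".toList, "might not".toList), ("mustn't".toList, "must not".toList), ("needn't".toList, "need not".toList)]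
def pvT1 : List (List Char × List Char) :=
  [("can't".toList, "cannot".toList), ("won't".toList, "will not".toList), ("isn't".toList, "is not".toList), ("aren't".toList, "are not".toList), ("wasn't".toList, "was not".toList), ("weren't".toList, "were not".toList), ("hasn't".toList, "has not".toList), ("haven't".toList, "have not".toList), ("hadn't".toList, "had not".toList), ("doesn't".toList, "does not".toList), ("didn't".toList, "did not".toList), ("shouldn't".toList, "should not".toList), ("couldn't".toList, "could not".toList), ("wouldn't".toList, "would not".toList), ("mightn't".toList, "might not".toList), ("mustn't".toList, "must not".toList), ("needn't".toList, "need not".toList)]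
def pvT2 : List (List Char × List Char) :=
  [("won't".toList, "will not".toList), ("isn't".toList, "is not".toList), ("aren't".toList, "are not".toList), ("wasn't".toList, "was not".toList), ("weren't".toList, "were not".toList), ("hasn't".toList, "has not".toList), ("haven't".toList, "have not".toList), ("hadn't".toList, "had not".toList), ("doesn't".toList, "does not".toList), ("didn't".toList, "did not".toList), ("shouldn't".toList, "should not".toList), ("couldn't".toList, "could not".toList), ("wouldn't".toList, "would not".toList), ("mightn't".toList, "might not".toList), ("mustn't".toList, "must not".toList), ("needn't".toList, "need not".toList)]
def pvT3 : List (List Char × List Char) :=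
  [("isn't".toList, "is not".toList), ("aren't".toList, "are not".toList), ("wasn't".toList, "was not".toList), ("weren't".toList, "were not".toList), ("hasn't".toList, "has not".toList), ("haven't".toList, "have not".toList), ("hadn't".toList, "had not".toList), ("doesn't".toList, "does not".toList), ("didn't".toList, "did not".toList), ("shouldn't".toList, "should not".toList), ("couldn't".toList, "could not".toList), ("wouldn't".toList, "would not".toList), ("mightn't".toList, "might not".toList), ("mustn't".toList, "must not".toList), ("needn't".toList, "need not".toList)]
def pvT4 : List (List Char × List Char) :=
  [("aren't".toList, "are not".toList), ("wasn't".toList, "was not".toList), ("weren't".toList, "were not".toList), ("hasn't".toList, "has not".toList), ("haven't".toList, "have not".toList), ("hadn't".toList, "had not".toList), ("doesn't".toList, "does not".toList), ("didn't".toList, "did not".toList), ("shouldn't".toList, "should not".toList), ("couldn't".toList, "could not".toList), ("wouldn't".toList, "would not".toList), ("mightn't".toList, "might not".toList), ("mustn't".toList, "must not".toList), ("needn't".toList, "need not".toList)]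
def pvT5 : List (List Char × List Char) :=
  [("wasn't".toList, "was not".toList), ("weren't".toList, "were not".toList), ("hasn't".toList, "has not".toList), ("haven't".toList, "have not".toList), ("hadn't".toList, "had not".toList), ("doesn't".toList, "does not".toList), ("didn't".toList, "did not".toList), ("shouldn't".toList, "should not".toList), ("couldn't".toList, "could not".toList), ("wouldn't".toList, "would not".toList), ("mightn't".toList, "might not".toList), ("mustn't".toList, "must not".toList), ("needn't".toList, "need not".toList)]
def pvT6 : List (List Char × List Char) :=
  [("weren't".toList, "were not".toList), ("hasn't".toList, "has not".toList), ("haven't".toList, "have not".toList), ("hadn't".toList, "had not".toList), ("doesn't".toList, "does not".toList), ("didn't".toList, "did not".toList), ("shouldn't".toList, "should not".toList), ("couldn't".toList, "could not".toList), ("wouldn't".toList, "would not".toList), ("mightn't".toList, "might not".toList), ("mustn't".toList, "must not".toList), ("needn't".toList, "need not".toList)]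
def pvT7 : List (List Char × List Char) :=
  [("hasn't".toList, "has not".toList), ("haven't".toList, "have not".toList), ("hadn't".toList, "had not".toList), ("doesn't".toList, "does not".toList), ("didn't".toList, "did not".toList), ("shouldn't".toList, "should not".toList), ("couldn't".toList, "could not".toList), ("wouldn't".toList, "would not".toList), ("mightn't".toList, "might not".toList), ("mustn't".toList, "must not".toList), ("needn't".toList, "need not".toList)]
def pvT8 : List (List Char × List Char) :=
  [("haven't".toList, "have not".toList), ("hadn't".toList, "had not".toList), ("doesn't".toList, "does not".toList), ("didn't".toList, "did not".toList), ("shouldn't".toList, "should not".toList), ("couldn't".toList, "could not".toList), ("wouldn't".toList, "would not".toList), ("mightn't".toList, "might not".toList), ("mustn't".toList, "must not".toList), ("needn't".toList, "need not".toList)]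
def pvT9 : List (List Char × List Char) :=
  [("hadn't".toList, "had not".toList), ("doesn't".toList, "does not".toList), ("didn't".toList, "did not".toList), ("shouldn't".toList, "should not".toList), ("couldn't".toList, "could not".toList), ("wouldn't".toList, "would not".toList), ("mightn't".toList, "might not".toList), ("mustn't".toList, "must not".toList), ("needn't".toList, "need not".toList)]
def pvT10 : List (List Char × List Char) :=
  [("doesn't".toList, "does not".toList), ("didn't".toList, "did not".toList), ("shouldn't".toList, "should not".toList), ("couldn't".toList, "could not".toList), ("wouldn't".toList, "would not".toList), ("mightn't".toList, "might not".toList), ("mustn't".toList, "must not".toList), ("needn't".toList, "need not".toList)]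
def pvT11 : List (List Char × List Char) :=
  [("didn't".toList, "did not".toList), ("shouldn't".toList, "should not".toList), ("couldn't".toList, "could not".toList), ("wouldn't".toList, "would not".toList), ("mightn't".toList, "might not".toList), ("mustn't".toList, "must not".toList), ("needn't".toList, "need not".toList)]
def pvT12 : List (List Char × List Char) :=
  [("shouldn't".toList, "should not".toList), ("couldn't".toList, "could not".toList), ("wouldn't".toList, "would not".toList), ("mightn't".toList, "might not".toList), ("mustn't".toList, "must not".toList), ("needn't".toList, "need not".toList)]
def pvT13 : List (List Char × List Char) :=
  [("couldn't".toList, "could not".toList), ("wouldn't".toList, "would not".toList), ("mightn't".toList, "might not".toList), ("mustn't".toList, "must not".toList), ("needn't".toList, "need not".toList)]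
def pvT14 : List (List Char × List Char) :=
  [("wouldn't".toList, "would not".toList), ("mightn't".toList, "might not".toList), ("mustn't".toList, "must not".toList), ("needn't".toList, "need not".toList)]
def pvT15 : List (List Char × List Char) :=
  [("mightn't".toList, "might not".toList), ("mustn't".toList, "must not".toList), ("needn't".toList, "need not".toList)]
def pvT16 : List (List Char × List Char) :=
  [("mustn't".toList, "must not".toList), ("needn't".toList, "need not".toList)]
def pvT17 : List (List Char × List Char) :=
  [("needn't".toList, "need not".toList)]
def pvT18 : List (List Char × List Char) :=
  []

-- the 18 single-pass fusion steps
lemma pvStep1 : ∀ l, pvScan pvT1 (replOne "don't".toList "do not".toList l) = pvScan pvT0 l :=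
  fun l => pvMain "don't".toList "do not".toList pvT1 (by decide) (by decide) (by decide) (by decide) (by decide) (by decide) l
lemma pvStep2 : ∀ l, pvScan pvT2 (replOne "can't".toList "cannot".toList l) = pvScan pvT1 l :=
  fun l => pvMain "can't".toList "cannot".toList pvT2 (by decide) (by decide) (by decide) (by decide) (by decide) (by decide) l
lemma pvStep3 : ∀ l, pvScan pvT3 (replOne "won't".toList "will not".toList l) = pvScan pvT2 l :=
  fun l => pvMain "won't".toList "will not".toList pvT3 (by decide) (by decide) (by decide) (by decide) (by decide) (by decide) l
lemma pvStep4 : ∀ l, pvScan pvT4 (replOne "isn't".toList "is not".toList l) = pvScan pvT3 l :=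
  fun l => pvMain "isn't".toList "is not".toList pvT4 (by decide) (by decide) (by decide) (by decide) (by decide) (by decide) l
lemma pvStep5 : ∀ l, pvScan pvT5 (replOne "aren't".toList "are not".toList l) = pvScan pvT4 l :=
  fun l => pvMain "aren't".toList "are not".toList pvT5 (by decide) (by decide) (by decide) (by decide) (by decide) (by decide) l
lemma pvStep6 : ∀ l, pvScan pvT6 (replOne "wasn't".toList "was not".toList l) = pvScan pvT5 l :=
  fun l => pvMain "wasn't".toList "was not".toList pvT6 (by decide) (by decide) (by decide) (by decide) (by decide) (by decide) l
lemma pvStep7 : ∀ l, pvScan pvT7 (replOne "weren't".toList "were not".toList l) = pvScan pvT6 l :=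
  fun l => pvMain "weren't".toList "were not".toList pvT7 (by decide) (by decide) (by decide) (by decide) (by decide) (by decide) l
lemma pvStep8 : ∀ l, pvScan pvT8 (replOne "hasn't".toList "has not".toList l) = pvScan pvT7 l :=
  fun l => pvMain "hasn't".toList "has not".toList pvT8 (by decide) (by decide) (by decide) (by decide) (by decide) (by decide) l
lemma pvStep9 : ∀ l, pvScan pvT9 (replOne "haven't".toList "have not".toList l) = pvScan pvT8 l :=
  fun l => pvMain "haven't".toList "have not".toList pvT9 (by decide) (by decide) (by decide) (by decide) (by decide) (by decide) l
lemma pvStep10 : ∀ l, pvScan pvT10 (replOne "hadn't".toList "had not".toList l) = pvScan pvT9 l :=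
  fun l => pvMain "hadn't".toList "had not".toList pvT10 (by decide) (by decide) (by decide) (by decide) (by decide) (by decide) l
lemma pvStep11 : ∀ l, pvScan pvT11 (replOne "doesn't".toList "does not".toList l) = pvScan pvT10 l :=
  fun l => pvMain "doesn't".toList "does not".toList pvT11 (by decide) (by decide) (by decide) (by decide) (by decide) (by decide) l
lemma pvStep12 : ∀ l, pvScan pvT12 (replOne "didn't".toList "did not".toList l) = pvScan pvT11 l :=
  fun l => pvMain "didn't".toList "did not".toList pvT12 (by decide) (by decide) (by decide) (by decide) (by decide) (by decide) l
lemma pvStep13 : ∀ l, pvScan pvT13 (replOne "shouldn't".toList "should not".toList l) = pvScan pvT12 l :=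
  fun l => pvMain "shouldn't".toList "should not".toList pvT13 (by decide) (by decide) (by decide) (by decide) (by decide) (by decide) l
lemma pvStep14 : ∀ l, pvScan pvT14 (replOne "couldn't".toList "could not".toList l) = pvScan pvT13 l :=
  fun l => pvMain "couldn't".toList "could not".toList pvT14 (by decide) (by decide) (by decide) (by decide) (by decide) (by decide) l
lemma pvStep15 : ∀ l, pvScan pvT15 (replOne "wouldn't".toList "would not".toList l) = pvScan pvT14 l :=
  fun l => pvMain "wouldn't".toList "would not".toList pvT15 (by decide) (by decide) (by decide) (by decide) (by decide) (by decide) l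
lemma pvStep16 : ∀ l, pvScan pvT16 (replOne "mightn't".toList "might not".toList l) = pvScan pvT15 l :=
  fun l => pvMain "mightn't".toList "might not".toList pvT16 (by decide) (by decide) (by decide) (by decide) (by decide) (by decide) l
lemma pvStep17 : ∀ l, pvScan pvT17 (replOne "mustn't".toList "must not".toList l) = pvScan pvT16 l :=
  fun l => pvMain "mustn't".toList "must not".toList pvT17 (by decide) (by decide) (by decide) (by decide) (by decide) (by decide) l
lemma pvStep18 : ∀ l, pvScan pvT18 (replOne "needn't".toList "need not".toList l) = pvScan pvT17 l :=
  fun l => pvMain "needn't".toList "need not".toList pvT18 (by decide) (by decide) (by decide) (by decide) (by decide) (by decide) l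

-- ===== VERDICT (by name: the statement is the Claim_ definition above) =====
theorem expand_contractions_py_spec : Claim_equal_expand_contractions_py := by
  intro text _
  unfold Spec_expand_contractions_py
  apply String.toList_inj.mp
  simp only [expand_contractions_py, expand_contractions_py_alt, String.toList_ofList,
    PySem.Str.toList_replace]
  rw [pvReplace_eq _ _ _ (by decide)]
  rw [pvReplace_eq _ _ _ (by decide)]
  rw [pvReplace_eq _ _ _ (by decide)]
  rw [pvReplace_eq _ _ _ (by decide)]
  rw [pvReplace_eq _ _ _ (by decide)]
  rw [pvReplace_eq _ _ _ (by decide)]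
  rw [pvReplace_eq _ _ _ (by decide)]
  rw [pvReplace_eq _ _ _ (by decide)]
  rw [pvReplace_eq _ _ _ (by decide)]
  rw [pvReplace_eq _ _ _ (by decide)]
  rw [pvReplace_eq _ _ _ (by decide)]
  rw [pvReplace_eq _ _ _ (by decide)]
  rw [pvReplace_eq _ _ _ (by decide)]
  rw [pvReplace_eq _ _ _ (by decide)]
  rw [pvReplace_eq _ _ _ (by decide)]
  rw [pvReplace_eq _ _ _ (by decide)]
  rw [pvReplace_eq _ _ _ (by decide)]
  rw [pvReplace_eq _ _ _ (by decide)]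
  show _ = pvScan pvT0 text.toList
  rw [← pvStep1]
  rw [← pvStep2]
  rw [← pvStep3]
  rw [← pvStep4]
  rw [← pvStep5]
  rw [← pvStep6]
  rw [← pvStep7]
  rw [← pvStep8]
  rw [← pvStep9]
  rw [← pvStep10]
  rw [← pvStep11]
  rw [← pvStep12]
  rw [← pvStep13]
  rw [← pvStep14]
  rw [← pvStep15]
  rw [← pvStep16]
  rw [← pvStep17]
  rw [← pvStep18]
  rw [show pvT18 = ([] : List (List Char × List Char)) from rfl, pvScan_nil_table]
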